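-- pv_equiv track=rewrite | github.com/Aishagojo/QuickRead | QuickRead/utils/nlp_analyzer.py | _summarize_technical_fallback
-- ===== SOURCE A (Python) =====
-- from typing import Dict, List
--
-- def _summarize_technical_fallback(sentences: List[str]) -> str:
--     """Fallback method for technical document summarization"""
--     # Extract key sentences that contain important technical concepts
--     important_sentences = []
--     technical_keywords = [
--         'develop', 'create', 'build', 'implement', 'design', 'architecture',
--         'integration', 'system', 'model', 'framework', 'platform', 'solution',
--         'challenge', 'problem', 'objective', 'goal', 'purpose'
--     ]
--
--     for sentence in sentences:
--         if len(sentence.split()) < 5:  # Skip very short sentences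
--             continue
--
--         sentence_lower = sentence.lower()
--
--         # Score based on technical importance
--         score = 0
--
--         # High importance for sentences with technical keywords
--         for keyword in technical_keywords:
--             if keyword in sentence_lower:
--                 score += 3
--
--         # Higher importance for sentences that define or describe
--         if any(word in sentence_lower for word in ['is a', 'are', 'means', 'defines', 'describes']):
--             score += 2
--
--         # Avoid code examples and configuration lines
--         if sentence.strip().startswith(';') or 'match self' in sentence_lower:
--             score = -10
--
--         if score > 0:
--             important_sentences.append((score, sentence))
--
--     # Sort by score and take top sentences
--     important_sentences.sort(key=lambda x: x[0], reverse=True)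
--
--     if important_sentences:
--         # Take top 4-6 sentences
--         top_sentences = [sentence for score, sentence in important_sentences[:6]]
--         return " ".join(top_sentences)
--     else:
--         # Final fallback: take first meaningful sentences
--         meaningful = [s for s in sentences if len(s.split()) > 8][:5]
--         return " ".join(meaningful)
-- ===== SOURCE B (Python) =====
-- from typing import Dict, List
--
-- _TECHNICAL_KEYWORDS = [
--     'develop', 'create', 'build', 'implement', 'design', 'architecture',
--     'integration', 'system', 'model', 'framework', 'platform', 'solution',
--     'challenge', 'problem', 'objective', 'goal', 'purpose'
-- ]
-- _DEFINITIONAL = ['is a', 'are', 'means', 'defines', 'describes']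
-- _MAX_SCORE = 3 * len(_TECHNICAL_KEYWORDS) + 2  # = 53
--
--
-- def _score(sentence: str) -> int:
--     low = sentence.lower()
--     if sentence.strip().startswith(';') or 'match self' in low:
--         return -10
--     return 3 * sum(1 for k in _TECHNICAL_KEYWORDS if k in low) + \
--         (2 if any(w in low for w in _DEFINITIONAL) else 0)
--
--
-- def _summarize_technical_fallback(sentences: List[str]) -> str:
--     # Bucket sentences by score; scores of kept sentences lie in 1.._MAX_SCORE,
--     # so walking the buckets from high score to low yields the stable
--     # descending order directly, with no sort.
--     buckets: Dict[int, List[str]] = {}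
--     for sentence in sentences:
--         if len(sentence.split()) < 5:
--             continue
--         sc = _score(sentence)
--         if sc > 0:
--             buckets.setdefault(sc, []).append(sentence)
--
--     selected = [s for sc in range(_MAX_SCORE, 0, -1) for s in buckets.get(sc, [])][:6]
--     if selected:
--         return " ".join(selected)
--     return " ".join([s for s in sentences if len(s.split()) > 8][:5])
-- ===== Notes on version B (the rewrite author's own statement) =====
-- stated objective: alternative
-- what changed: Replaces the full stable descending sort of the scored (score, sentence) list plus slice by a dict of score buckets (scores of kept sentences are bounded by 1..53) walked from the maximum score down, and computes the score as 3*count(keywords)+bonus with an early -10 return instead of an accumulation loop.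
import Mathlib
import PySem

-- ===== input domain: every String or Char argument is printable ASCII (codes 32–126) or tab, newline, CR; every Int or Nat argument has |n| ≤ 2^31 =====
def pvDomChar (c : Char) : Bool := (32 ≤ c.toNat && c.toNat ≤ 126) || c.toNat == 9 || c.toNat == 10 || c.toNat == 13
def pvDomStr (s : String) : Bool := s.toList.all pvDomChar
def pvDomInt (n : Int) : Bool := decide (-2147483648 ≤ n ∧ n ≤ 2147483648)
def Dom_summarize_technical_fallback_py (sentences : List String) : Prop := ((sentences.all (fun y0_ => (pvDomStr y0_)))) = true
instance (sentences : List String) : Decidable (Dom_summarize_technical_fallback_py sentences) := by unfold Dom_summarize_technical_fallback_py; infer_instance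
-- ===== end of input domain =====

-- B replaces A's stable descending sort + slice by score buckets (a dict keyed by the
-- bounded score 1..53) walked from the maximum score down; same selected sentences, no sort.

def pvKeywords : List String :=
  ["develop", "create", "build", "implement", "design", "architecture",
   "integration", "system", "model", "framework", "platform", "solution",
   "challenge", "problem", "objective", "goal", "purpose"]

def pvDefWords : List String := ["is a", "are", "means", "defines", "describes"]

-- ===== PORT A =====
-- A's per-sentence score: keyword loop (+3 each), +2 for definitional words, overridden to -10
def pvScoreA (sentence : String) : Int :=
  let low := PySem.Str.lower sentence
  let score : Int := pvKeywords.foldl (fun sc k => if PySem.Str.isIn k low then sc + 3 else sc) 0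
  let score := if pvDefWords.any (fun w => PySem.Str.isIn w low) then score + 2 else score
  let score := if PySem.Str.startswith (PySem.Str.strip sentence) ";" || PySem.Str.isIn "match self" low then (-10 : Int) else score
  score

-- one iteration of A's main loop (continue on short sentences, append (score, sentence) if score > 0)
def pvStepA (acc : List (Int × String)) (sentence : String) : List (Int × String) :=
  if (PySem.Str.split₀ sentence).length < 5 then acc
  else
    let score := pvScoreA sentence
    if 0 < score then acc ++ [(score, sentence)] else acc

def summarize_technical_fallback_py (sentences : List String) : String :=
  let important : List (Int × String) := sentences.foldl pvStepA []
  let important := PySem.List.sorted important (fun x => x.1) true  -- sort(key=x[0], reverse=True)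
  if important ≠ [] then
    PySem.Str.join " " ((PySem.List.slice important none (some 6)).map (fun p => p.2))
  else
    PySem.Str.join " " (PySem.List.slice (sentences.filter (fun s => decide (8 < (PySem.Str.split₀ s).length))) none (some 5))

-- ===== PORT B =====
-- B's score: early -10 for code/config lines, else 3·(keyword count) + definitional bonus
def pvScoreB (sentence : String) : Int :=
  let low := PySem.Str.lower sentence
  if PySem.Str.startswith (PySem.Str.strip sentence) ";" || PySem.Str.isIn "match self" low then
    (-10 : Int)
  else
    3 * (pvKeywords.countP (fun k => PySem.Str.isIn k low) : Int)
      + (if pvDefWords.any (fun w => PySem.Str.isIn w low) then 2 else 0)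

-- one iteration of B's bucket-filling loop (buckets.setdefault(sc, []).append(sentence))
def pvStepB (d : PySem.Dict Int (List String)) (sentence : String) : PySem.Dict Int (List String) :=
  if (PySem.Str.split₀ sentence).length < 5 then d
  else
    let sc := pvScoreB sentence
    if 0 < sc then d.insert sc (d.getD sc [] ++ [sentence]) else d

def summarize_technical_fallback_py_alt (sentences : List String) : String :=
  let buckets := sentences.foldl pvStepB PySem.Dict.empty
  -- [s for sc in range(53, 0, -1) for s in buckets.get(sc, [])][:6]  ([:6] = take 6)
  let selected := ((PySem.List.pyRange 53 0 (-1)).flatMap (fun sc => buckets.getD sc [])).take 6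
  if selected ≠ [] then PySem.Str.join " " selected
  else PySem.Str.join " " ((sentences.filter (fun s => decide (8 < (PySem.Str.split₀ s).length))).take 5)

-- ===== PRECONDITION & SPEC =====
def Spec_summarize_technical_fallback_py (sentences : List String) (out : String) : Prop := out = summarize_technical_fallback_py_alt sentences
instance (sentences : List String) (out : String) : Decidable (Spec_summarize_technical_fallback_py sentences out) := by unfold Spec_summarize_technical_fallback_py; infer_instance

-- ===== CLAIM (what is proved, stated in full; the proofs are below) =====
def Claim_equal_summarize_technical_fallback_py : Prop := ∀ (sentences : List String), Dom_summarize_technical_fallback_py sentences → Spec_summarize_technical_fallback_py sentences (summarize_technical_fallback_py sentences)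

-- ===== LEMMAS AND PROOFS =====

-- A's keyword accumulation loop totals 3 · (number of matching keywords)
theorem pv_foldl_add3 (l : List String) (p : String → Bool) (a : Int) :
    l.foldl (fun sc k => if p k then sc + 3 else sc) a = a + 3 * (l.countP p : Int) := by
  induction l generalizing a with
  | nil => simp
  | cons x t ih =>
    by_cases h : p x <;> simp [h, ih, List.countP_cons] <;> push_cast <;> ring

theorem pvScore_eq (s : String) : pvScoreA s = pvScoreB s := by
  simp only [pvScoreA, pvScoreB]
  rw [pv_foldl_add3]
  split_ifs <;> omega

theorem pvScoreB_bounds (s : String) (h : 0 < pvScoreB s) : 1 ≤ pvScoreB s ∧ pvScoreB s ≤ 53 := by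
  have hc : pvKeywords.countP (fun k => PySem.Str.isIn k (PySem.Str.lower s)) ≤ 17 := by
    have := List.countP_le_length (l := pvKeywords) (p := fun k => PySem.Str.isIn k (PySem.Str.lower s))
    simpa [pvKeywords] using this
  simp only [pvScoreB] at h ⊢
  split_ifs at h ⊢ <;> omega

-- the bucket dict agrees group-by-group with A's scored list
theorem pv_buckets_getD (l : List String) (d : PySem.Dict Int (List String))
    (acc : List (Int × String))
    (hinv : ∀ sc, d.getD sc [] = (acc.filter (fun p => p.1 == sc)).map Prod.snd) :
    ∀ sc, (l.foldl pvStepB d).getD sc [] =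
      ((l.foldl pvStepA acc).filter (fun p => p.1 == sc)).map Prod.snd := by
  induction l generalizing d acc with
  | nil => simpa using hinv
  | cons x t ih =>
    simp only [List.foldl_cons]
    apply ih
    intro sc
    simp only [pvStepA, pvStepB]
    rw [pvScore_eq]
    by_cases h1 : (PySem.Str.split₀ x).length < 5
    · rw [if_pos h1, if_pos h1]
      exact hinv sc
    · rw [if_neg h1, if_neg h1]
      by_cases h2 : 0 < pvScoreB x
      · rw [if_pos h2, if_pos h2, PySem.Dict.getD_insert, List.filter_append, List.map_append, hinv sc]
        by_cases h3 : sc = pvScoreB x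
        · have h3' : (pvScoreB x == sc) = true := by simp [h3]
          rw [if_pos h3, hinv (pvScoreB x), h3]
          simp [List.filter_cons, h3']
        · have h3' : (pvScoreB x == sc) = false := by
            simp only [beq_eq_false_iff_ne, ne_eq]
            exact fun hc => h3 hc.symm
          rw [if_neg h3]
          simp [List.filter_cons, h3']
      · rw [if_neg h2, if_neg h2]
        exact hinv sc

-- every pair A keeps has its score in 1..53
theorem pv_impA_bounds (l : List String) (acc : List (Int × String))
    (hacc : ∀ p ∈ acc, 1 ≤ p.1 ∧ p.1 ≤ 53) :
    ∀ p ∈ l.foldl pvStepA acc, 1 ≤ p.1 ∧ p.1 ≤ 53 := by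
  induction l generalizing acc with
  | nil => simpa using hacc
  | cons x t ih =>
    simp only [List.foldl_cons]
    apply ih
    intro p hp
    have hb : 0 < pvScoreA x → 1 ≤ pvScoreA x ∧ pvScoreA x ≤ 53 := by
      rw [pvScore_eq]
      exact pvScoreB_bounds x
    simp only [pvStepA] at hp
    generalize hs : pvScoreA x = s at hp hb
    split_ifs at hp with h1 h2
    · exact hacc p hp
    · rcases List.mem_append.mp hp with h | h
      · exact hacc p h
      · simp only [List.mem_singleton] at h
        subst h
        exact hb h2
    · exact hacc p hp

theorem pv_insertBy_append_skip {α : Type} (before : α → α → Bool) (x : α)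
    (as bs : List α) (h : ∀ y ∈ as, before x y = false) :
    PySem.List.insertBy before x (as ++ bs) = as ++ PySem.List.insertBy before x bs := by
  induction as with
  | nil => simp
  | cons a t ih =>
    have ha := h a (by simp)
    simp only [List.cons_append, PySem.List.insertBy, ha]
    simp only [Bool.false_eq_true, if_false]
    rw [ih (fun y hy => h y (by simp [hy]))]

-- inserting (reverse-stably) into the score-grouped flattening appends x at the end of its own group
theorem pv_insert_grouped (S : List Int) (x : Int × String) (l : List (Int × String))
    (hS : S.Pairwise (· > ·)) (hx : x.1 ∈ S) :
    PySem.List.insertBy (fun a b => decide (b.1 < a.1)) x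
        (S.flatMap (fun sc => l.filter (fun p => p.1 == sc)))
      = S.flatMap (fun sc => (l ++ [x]).filter (fun p => p.1 == sc)) := by
  induction S with
  | nil => cases hx
  | cons sc S' ih =>
    rw [List.pairwise_cons] at hS
    have hgt : ∀ t ∈ S', t < sc := fun t ht => hS.1 t ht
    by_cases hxs : x.1 = sc
    · -- x belongs to the head bucket: skip over it, land before the (strictly smaller) rest
      have hskip : ∀ y ∈ l.filter (fun p => p.1 == sc), (fun a b : Int × String => decide (b.1 < a.1)) x y = false := by
        intro y hy
        have : y.1 = sc := by simpa using (List.of_mem_filter hy)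
        simp [this, hxs]
      rw [List.flatMap_cons, pv_insertBy_append_skip _ _ _ _ hskip]
      have hrest : PySem.List.insertBy (fun a b : Int × String => decide (b.1 < a.1)) x
          (S'.flatMap (fun t => l.filter (fun p => p.1 == t)))
          = x :: S'.flatMap (fun t => l.filter (fun p => p.1 == t)) := by
        cases hM : S'.flatMap (fun t => l.filter (fun p => p.1 == t)) with
        | nil => simp [PySem.List.insertBy]
        | cons y ys =>
          have hy : y ∈ S'.flatMap (fun t => l.filter (fun p => p.1 == t)) := by rw [hM]; simp
          rw [List.mem_flatMap] at hy
          obtain ⟨t, ht, hyf⟩ := hy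
          have hyt : y.1 = t := by simpa using (List.of_mem_filter hyf)
          have : y.1 < x.1 := by rw [hyt, hxs]; exact hgt t ht
          simp [PySem.List.insertBy, this]
      rw [hrest]
      have hS'F : S'.flatMap (fun t => (l ++ [x]).filter (fun p => p.1 == t))
          = S'.flatMap (fun t => l.filter (fun p => p.1 == t)) := by
        apply List.flatMap_congr  -- x's key sc is absent from the strictly smaller tail
        intro t ht
        have hne : (x.1 == t) = false := by
          have := hgt t ht
          simp only [beq_eq_false_iff_ne, ne_eq, hxs]
          omega
        simp [List.filter_append, List.filter_cons, hne]
      have hGsc : (l ++ [x]).filter (fun p => p.1 == sc)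
          = l.filter (fun p => p.1 == sc) ++ [x] := by
        have hbeq : (x.1 == sc) = true := by simp [hxs]
        simp [List.filter_append, List.filter_cons, hbeq]
      rw [List.flatMap_cons, hGsc, hS'F]
      simp
    · -- x belongs to a later bucket: pass the whole head group, recurse
      have hx' : x.1 ∈ S' := by
        rcases List.mem_cons.mp hx with h | h
        · exact absurd h hxs
        · exact h
      have hlt : x.1 < sc := hgt _ hx'
      have hskip : ∀ y ∈ l.filter (fun p => p.1 == sc), (fun a b : Int × String => decide (b.1 < a.1)) x y = false := by
        intro y hy
        have : y.1 = sc := by simpa using (List.of_mem_filter hy)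
        simp [this]; omega
      rw [List.flatMap_cons, pv_insertBy_append_skip _ _ _ _ hskip, ih hS.2 hx']
      have hGsc : (l ++ [x]).filter (fun p => p.1 == sc)
          = l.filter (fun p => p.1 == sc) := by
        have hbeq : (x.1 == sc) = false := by simpa using hxs
        simp [List.filter_append, List.filter_cons, hbeq]
      rw [List.flatMap_cons, hGsc]

-- stable descending sort of a list whose keys all lie in the strictly descending S equals the grouped flattening
theorem pv_sorted_grouped (S : List Int) (hS : S.Pairwise (· > ·)) (l : List (Int × String))
    (hl : ∀ p ∈ l, p.1 ∈ S) :
    PySem.List.sorted l (fun x => x.1) true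
      = S.flatMap (fun sc => l.filter (fun p => p.1 == sc)) := by
  rw [PySem.List.sorted_rev_eq_foldl_insertBy]
  induction l using List.reverseRecOn with
  | nil => simp
  | append_singleton t x ih =>
    rw [List.foldl_append, List.foldl_cons, List.foldl_nil,
        ih (fun p hp => hl p (by simp [hp]))]
    exact pv_insert_grouped S x t hS (hl x (by simp))

def pvDescRange : List Int := PySem.List.pyRange 53 0 (-1)

theorem pvDescRange_eq : pvDescRange = (List.range 53).map (fun (i : Nat) => (53 : Int) - (i : Int)) := by decide

theorem pvDescRange_pairwise : pvDescRange.Pairwise (· > ·) := by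
  rw [pvDescRange_eq, List.pairwise_map]
  exact List.pairwise_lt_range.imp (fun {a b} h => by omega)

theorem pvDescRange_mem (a : Int) (h1 : 1 ≤ a) (h2 : a ≤ 53) : a ∈ pvDescRange := by
  rw [pvDescRange_eq, List.mem_map]
  exact ⟨(53 - a).toNat, by rw [List.mem_range]; omega, by omega⟩

theorem pv_dict_empty_getD (sc : Int) : (PySem.Dict.empty : PySem.Dict Int (List String)).getD sc [] = [] := by
  rfl

-- ===== VERDICT (by name: the statement is the Claim_ definition above) =====
theorem summarize_technical_fallback_py_spec : Claim_equal_summarize_technical_fallback_py := by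
  intro sentences _
  unfold Spec_summarize_technical_fallback_py
  simp only [summarize_technical_fallback_py, summarize_technical_fallback_py_alt]
  set imp := sentences.foldl pvStepA [] with himp
  have hbounds : ∀ p ∈ imp, 1 ≤ p.1 ∧ p.1 ≤ 53 :=
    pv_impA_bounds sentences [] (by simp)
  have hmem : ∀ p ∈ imp, p.1 ∈ pvDescRange := fun p hp =>
    pvDescRange_mem p.1 (hbounds p hp).1 (hbounds p hp).2
  have hsorted : PySem.List.sorted imp (fun x => x.1) true
      = pvDescRange.flatMap (fun sc => imp.filter (fun p => p.1 == sc)) :=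
    pv_sorted_grouped pvDescRange pvDescRange_pairwise imp hmem
  have hbuck : ∀ sc, (sentences.foldl pvStepB PySem.Dict.empty).getD sc []
      = (imp.filter (fun p => p.1 == sc)).map Prod.snd :=
    pv_buckets_getD sentences PySem.Dict.empty [] (fun sc => by rw [pv_dict_empty_getD]; simp)
  have hsel : ((PySem.List.pyRange 53 0 (-1)).flatMap
        (fun sc => (sentences.foldl pvStepB PySem.Dict.empty).getD sc [])).take 6
      = ((PySem.List.sorted imp (fun x => x.1) true).map Prod.snd).take 6 := by
    have : (PySem.List.pyRange 53 0 (-1)).flatMap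
        (fun sc => (sentences.foldl pvStepB PySem.Dict.empty).getD sc [])
        = pvDescRange.flatMap (fun sc => (imp.filter (fun p => p.1 == sc)).map Prod.snd) := by
      unfold pvDescRange
      exact List.flatMap_congr (fun sc _ => hbuck sc)
    rw [this, ← List.map_flatMap, ← hsorted]
  have hslice6 : PySem.List.slice (PySem.List.sorted imp (fun x => x.1) true) none (some 6)
      = (PySem.List.sorted imp (fun x => x.1) true).take 6 := by
    simpa using PySem.List.slice_to (PySem.List.sorted imp (fun x => x.1) true) (b := 6) (by omega)
  have hslice5 : PySem.List.slice (sentences.filter (fun s => decide (8 < (PySem.Str.split₀ s).length))) none (some 5)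
      = (sentences.filter (fun s => decide (8 < (PySem.Str.split₀ s).length))).take 5 := by
    simpa using PySem.List.slice_to (sentences.filter (fun s => decide (8 < (PySem.Str.split₀ s).length))) (b := 5) (by omega)
  simp only [hsel, hslice6, hslice5]
  have hcond : (PySem.List.sorted imp (fun x => x.1) true ≠ []) ↔
      (((PySem.List.sorted imp (fun x => x.1) true).map Prod.snd).take 6 ≠ []) := by
    rw [not_iff_not, List.take_eq_nil_iff, List.map_eq_nil_iff]
    constructor
    · intro h; right; exact h
    · rintro (h | h)
      · omega
      · exact h
  by_cases hB : ((PySem.List.sorted imp (fun x => x.1) true).map Prod.snd).take 6 ≠ []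
  · have hA : PySem.List.sorted imp (fun x => x.1) true ≠ [] := hcond.mpr hB
    rw [if_pos hA, if_pos hB, ← List.map_take]
  · have hA : ¬ PySem.List.sorted imp (fun x => x.1) true ≠ [] := fun h => hB (hcond.mp h)
    rw [if_neg hA, if_neg hB]
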